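-- pv_equiv track=rewrite | github.com/Gayang2902/boj | greedy/25379.py | solution
-- ===== SOURCE A (Python) =====
-- def solution(N, A):
--     # cnt[0] = 홀수, cnt[1] = 짝수
--     cnt = [0, 0]
--     # mov[0] = 홀수를 왼쪽으로, mov[1] = 짝수를 왼쪽으로
--     mov = [0, 0]
--
--     for a in A:
--         idx = a % 2
--         cnt[idx] += 1
--         mov[idx] += cnt[1 - idx]
--
--     return min(mov)
-- ===== SOURCE B (Python) =====
-- def solution(N, A):
--     k = e = sodd = seven = 0
--     for i, a in enumerate(A):
--         if a % 2:
--             k += 1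
--             sodd += i
--         else:
--             e += 1
--             seven += i
--     return min(sodd - k * (k - 1) // 2, seven - e * (e - 1) // 2)
-- ===== Notes on version B (the rewrite author's own statement) =====
-- stated objective: alternative
-- what changed: Replaces the running cross-parity counter (mov[idx] += opposite count at each step) by a positional closed form: one pass accumulates each parity's count and sum of indices, and the two inversion totals are recovered as sum-of-positions minus the triangular number of the count.
import Mathlib
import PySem

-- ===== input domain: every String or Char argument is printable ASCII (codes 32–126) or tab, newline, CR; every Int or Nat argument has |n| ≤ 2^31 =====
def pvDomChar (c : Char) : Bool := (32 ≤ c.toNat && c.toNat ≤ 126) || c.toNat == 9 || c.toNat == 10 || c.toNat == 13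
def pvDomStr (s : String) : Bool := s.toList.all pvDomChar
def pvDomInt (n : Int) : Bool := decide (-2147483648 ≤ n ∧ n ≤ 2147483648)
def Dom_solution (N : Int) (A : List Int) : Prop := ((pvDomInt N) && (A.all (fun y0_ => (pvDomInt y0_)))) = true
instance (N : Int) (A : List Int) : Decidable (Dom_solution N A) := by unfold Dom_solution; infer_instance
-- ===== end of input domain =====

-- B replaces A's running cross-parity counter by per-parity index sums with a triangular-number
-- closed form (objective: alternative decomposition, same O(n) cost).

-- ===== PORT A =====
-- state = (cnt0, cnt1, mov0, mov1); idx = a % 2 selects which cnt/mov cell is updated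
def solutionStep (s : Int × Int × Int × Int) (a : Int) : Int × Int × Int × Int :=
  let idx := PySem.Int.mod a 2
  if idx = 1 then (s.1, s.2.1 + 1, s.2.2.1, s.2.2.2 + s.1)
  else (s.1 + 1, s.2.1, s.2.2.1 + s.2.1, s.2.2.2)

def solution (N : Int) (A : List Int) : Int :=
  let st := A.foldl solutionStep (0, 0, 0, 0)
  min st.2.2.1 st.2.2.2

-- ===== PORT B =====
-- state = (k, e, sodd, seven); fold over enumerate(A) as in Source B
def solutionAltStep (s : Int × Int × Int × Int) (p : Int × Int) : Int × Int × Int × Int :=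
  if PySem.Int.mod p.2 2 ≠ 0 then (s.1 + 1, s.2.1, s.2.2.1 + p.1, s.2.2.2)
  else (s.1, s.2.1 + 1, s.2.2.1, s.2.2.2 + p.1)

def solution_alt (N : Int) (A : List Int) : Int :=
  let st := (PySem.List.enumerate A).foldl solutionAltStep (0, 0, 0, 0)
  min (st.2.2.1 - PySem.Int.floordiv (st.1 * (st.1 - 1)) 2)
      (st.2.2.2 - PySem.Int.floordiv (st.2.1 * (st.2.1 - 1)) 2)

-- ===== PRECONDITION & SPEC =====
def Spec_solution (N : Int) (A : List Int) (out : Int) : Prop := out = solution_alt N A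
instance (N : Int) (A : List Int) (out : Int) : Decidable (Spec_solution N A out) := by unfold Spec_solution; infer_instance

-- ===== CLAIM (what is proved, stated in full; the proofs are below) =====
def Claim_equal_solution : Prop := ∀ (N : Int) (A : List Int), Dom_solution N A → Spec_solution N A (solution N A)

-- ===== LEMMAS AND PROOFS =====

-- Invariant relating the two loop states (doubled to avoid division):
-- cnt1 = k, cnt0 = e, next index = k + e, 2*mov1 = 2*sodd - k*(k-1), 2*mov0 = 2*seven - e*(e-1)
lemma loop_inv (l : List Int) : ∀ (c0 c1 m0 m1 k e so se i : Int),
    c1 = k → c0 = e → i = k + e →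
    2 * m1 = 2 * so - k * (k - 1) → 2 * m0 = 2 * se - e * (e - 1) →
    (let sa := l.foldl solutionStep (c0, c1, m0, m1)
     let sb := (PySem.List.enumerate l i).foldl solutionAltStep (k, e, so, se)
     sa.2.1 = sb.1 ∧ sa.1 = sb.2.1 ∧
     2 * sa.2.2.2 = 2 * sb.2.2.1 - sb.1 * (sb.1 - 1) ∧
     2 * sa.2.2.1 = 2 * sb.2.2.2 - sb.2.1 * (sb.2.1 - 1)) := by
  induction l with
  | nil => intro c0 c1 m0 m1 k e so se i h1 h2 h3 h4 h5
           simp [PySem.List.enumerate_nil]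
           exact ⟨h1, h2, by omega, by omega⟩
  | cons a t ih =>
    intro c0 c1 m0 m1 k e so se i h1 h2 h3 h4 h5
    have hm : PySem.Int.mod a 2 = 0 ∨ PySem.Int.mod a 2 = 1 := by
      have := PySem.Int.mod_two_eq a
      rcases this with h | h
      · exact Or.inl h
      · exact Or.inr h
    simp only [PySem.List.enumerate_cons, List.foldl_cons]
    rcases hm with h | h
    · simp only [solutionStep, solutionAltStep, h]
      norm_num
      exact ih _ _ _ _ _ _ _ _ _ h1 (by omega) (by omega) h4
        (by rw [h1, h3]; linear_combination h5)
    · simp only [solutionStep, solutionAltStep, h]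
      norm_num
      exact ih _ _ _ _ _ _ _ _ _ (by omega) h2 (by omega)
        (by rw [h2, h3]; linear_combination h4) h5

-- ===== VERDICT (by name: the statement is the Claim_ definition above) =====
theorem solution_spec : Claim_equal_solution := by
  intro N A _
  unfold Spec_solution solution solution_alt
  have h := loop_inv A 0 0 0 0 0 0 0 0 0 rfl rfl (by omega) (by omega) (by omega)
  simp only at h
  set sa := A.foldl solutionStep (0, 0, 0, 0) with hsa
  set sb := (PySem.List.enumerate A 0).foldl solutionAltStep (0, 0, 0, 0) with hsb
  obtain ⟨h1, h2, h3, h4⟩ := h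
  have ev1 : Even (sb.1 * (sb.1 - 1)) := by
    have := Int.even_mul_succ_self (sb.1 - 1)
    simpa [mul_comm] using this
  have ev2 : Even (sb.2.1 * (sb.2.1 - 1)) := by
    have := Int.even_mul_succ_self (sb.2.1 - 1)
    simpa [mul_comm] using this
  have f1 : PySem.Int.floordiv (sb.1 * (sb.1 - 1)) 2 = (sb.1 * (sb.1 - 1)) / 2 :=
    PySem.Int.floordiv_eq_ediv_of_pos (by omega)
  have f2 : PySem.Int.floordiv (sb.2.1 * (sb.2.1 - 1)) 2 = (sb.2.1 * (sb.2.1 - 1)) / 2 :=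
    PySem.Int.floordiv_eq_ediv_of_pos (by omega)
  show min sa.2.2.1 sa.2.2.2 =
      min (sb.2.2.1 - PySem.Int.floordiv (sb.1 * (sb.1 - 1)) 2)
          (sb.2.2.2 - PySem.Int.floordiv (sb.2.1 * (sb.2.1 - 1)) 2)
  rw [f1, f2]
  obtain ⟨x, hx⟩ := ev1
  obtain ⟨y, hy⟩ := ev2
  rw [min_comm]
  congr 1 <;> omega
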